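-- pv_equiv track=rewrite | github.com/settor21/genAndScoreAbbreviations | abbreviationRules.py | indexedText
-- ===== SOURCE A (Python) =====
-- def indexedText(text):
--     text = text.upper()  # Convert text to uppercase
--     indexedScores = {}  # Dictionary to store the index of each character
--     words = text.split()  # Split the text into words to manage compound words
--     for word in words:  # for aach entry
--         for index, char in enumerate(word):  # for each letter and its index
--             if char not in indexedScores:
--                 # Initialize an empty list for each character
--                 indexedScores[char] = []
--             # Check if the character is the last in the word and
--             # the word has more than one character
--             if index == len(word) - 1 and len(word) > 1:
--                 # Append -1 to represent the last character in the word
--                 indexedScores[char].append(-1)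
--             else:
--                 # Append the index of the character
--                 indexedScores[char].append(index)
--     return indexedScores  # Return the dictionary of indexed characters
-- ===== SOURCE B (Python) =====
-- def indexedText(text):
--     # Group-by instead of dict scatter: flatten to a (char, value) stream,
--     # then for each distinct char (first-occurrence order) gather its values.
--     words = text.upper().split()
--     stream = [(c, -1 if i == len(w) - 1 and len(w) > 1 else i)
--               for w in words for i, c in enumerate(w)]
--     order = list(dict.fromkeys(c for c, _ in stream))
--     return {c: [v for ch, v in stream if ch == c] for c in order}
-- ===== Notes on version B (the rewrite author's own statement) =====
-- stated objective: alternative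
-- what changed: B inverts A's loop: instead of scattering each character's value into a mutated dict with a membership test and a last-character conditional, it flattens the text into a (char, value) stream, computes the key order once with dict.fromkeys, and builds the result by gathering (filtering) each distinct character's values from the stream.
import Mathlib
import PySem

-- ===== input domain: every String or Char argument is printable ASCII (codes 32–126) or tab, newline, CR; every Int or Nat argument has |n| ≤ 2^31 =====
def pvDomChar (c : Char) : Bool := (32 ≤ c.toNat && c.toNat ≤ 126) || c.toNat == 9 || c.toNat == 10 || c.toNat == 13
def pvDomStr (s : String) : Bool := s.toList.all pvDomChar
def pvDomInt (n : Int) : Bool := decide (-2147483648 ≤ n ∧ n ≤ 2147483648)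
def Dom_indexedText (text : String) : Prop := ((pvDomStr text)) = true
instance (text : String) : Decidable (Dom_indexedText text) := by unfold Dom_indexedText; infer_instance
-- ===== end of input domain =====

-- B replaces A's scatter-into-dict loop by a group-by: flatten to a (char, value)
-- stream, dedup the characters, and gather each character's values by filtering
-- (objective: alternative algorithm, not faster).

-- ===== PORT A =====
def indexedText (text : String) : List (String × List Int) :=
  let t := PySem.Str.upper text
  let words := PySem.Str.split₀ t
  (words.foldl (fun d w =>
    (PySem.List.enumerate w.toList 0).foldl (fun d ic =>
      let c := String.ofList [ic.2]
      let d := if d.contains c then d else d.insert c ([] : List Int)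
      if ic.1 = PySem.Str.len w - 1 ∧ 1 < PySem.Str.len w then
        d.modify c [] (· ++ [-1])
      else
        d.modify c [] (· ++ [ic.1])) d)
    (PySem.Dict.empty)).items

-- ===== PORT B =====
-- the stream [(c, -1 if i == len(w)-1 and len(w) > 1 else i) for w in words for i, c in enumerate(w)]
def pvStream (words : List String) : List (String × Int) :=
  words.flatMap (fun w =>
    (PySem.List.enumerate w.toList 0).map (fun ic =>
      (String.ofList [ic.2],
       if ic.1 = PySem.Str.len w - 1 ∧ 1 < PySem.Str.len w then (-1 : Int) else ic.1)))

def indexedText_alt (text : String) : List (String × List Int) :=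
  let stream := pvStream (PySem.Str.split₀ (PySem.Str.upper text))
  let order := PySem.List.dedup (stream.map (·.1))         -- list(dict.fromkeys(...))
  order.map (fun c => (c, (stream.filter (fun p => p.1 == c)).map (·.2)))

-- ===== PRECONDITION & SPEC =====
def Spec_indexedText (text : String) (out : List (String × List Int)) : Prop := out = indexedText_alt text
instance (text : String) (out : List (String × List Int)) : Decidable (Spec_indexedText text out) := by unfold Spec_indexedText; infer_instance

-- ===== CLAIM (what is proved, stated in full; the proofs are below) =====
def Claim_equal_indexedText : Prop := ∀ (text : String), Dom_indexedText text → Spec_indexedText text (indexedText text)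

-- ===== LEMMAS AND PROOFS =====

-- A's "insert [] if missing, then append" is exactly Dict.modify with default []
lemma pv_insert_modify (d : PySem.Dict String (List Int)) (c : String) (f : List Int → List Int) :
    ((if d.contains c then d else d.insert c ([] : List Int)).modify c [] f) = d.modify c [] f := by
  by_cases h : d.contains c
  · rw [if_pos h]
  · rw [if_neg h]
    have hb : d.contains c = false := by simpa using h
    simp only [PySem.Dict.modify, PySem.Dict.getD_insert_self, PySem.Dict.insert_insert_self,
      PySem.Dict.getD_of_not_contains d [] hb]

-- A's per-character step, seen as a function of the (char, value) pair B streams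
def pvStep (d : PySem.Dict String (List Int)) (p : String × Int) : PySem.Dict String (List Int) :=
  d.modify p.1 [] (· ++ [p.2])

lemma pv_word_fold (w : String) (d : PySem.Dict String (List Int)) :
    (PySem.List.enumerate w.toList 0).foldl (fun d ic =>
      let c := String.ofList [ic.2]
      let d := if d.contains c then d else d.insert c ([] : List Int)
      if ic.1 = PySem.Str.len w - 1 ∧ 1 < PySem.Str.len w then
        d.modify c [] (· ++ [-1])
      else
        d.modify c [] (· ++ [ic.1])) d
    = ((PySem.List.enumerate w.toList 0).map (fun ic =>
        (String.ofList [ic.2],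
         if ic.1 = PySem.Str.len w - 1 ∧ 1 < PySem.Str.len w then (-1 : Int) else ic.1))).foldl pvStep d := by
  rw [List.foldl_map]
  apply PySem.List.foldl_congr_mem
  intro d' ic _
  by_cases h : ic.1 = PySem.Str.len w - 1 ∧ 1 < PySem.Str.len w
  · simp only [if_pos h, pvStep, pv_insert_modify]
  · simp only [if_neg h, pvStep, pv_insert_modify]

lemma pv_foldl_flatMap {α β γ : Type} (g : α → List β) (f : γ → β → γ) (l : List α) (d : γ) :
    (l.flatMap g).foldl f d = l.foldl (fun d x => (g x).foldl f d) d := by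
  induction l generalizing d with
  | nil => rfl
  | cons x xs ih => simp [List.flatMap_cons, List.foldl_append, ih]

lemma pv_fold_eq_stream (text : String) :
    indexedText text = ((pvStream (PySem.Str.split₀ (PySem.Str.upper text))).foldl pvStep PySem.Dict.empty).items := by
  simp only [indexedText, pvStream, pv_foldl_flatMap]
  congr 2
  funext d w
  exact pv_word_fold w d

-- ===== VERDICT (by name: the statement is the Claim_ definition above) =====
theorem indexedText_spec : Claim_equal_indexedText := by
  intro text _
  show indexedText text = indexedText_alt text
  rw [pv_fold_eq_stream]
  simp only [indexedText_alt]
  set l := pvStream (PySem.Str.split₀ (PySem.Str.upper text)) with hl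
  have hfold : ∀ d : PySem.Dict String (List Int),
      l.foldl pvStep d = l.foldl (fun d p => d.modify p.1 [] (· ++ [p.2])) d := by
    intro d; rfl
  have hnd : (l.foldl pvStep PySem.Dict.empty).keys.Nodup := by
    rw [hfold]
    exact PySem.Dict.nodup_keys_foldl_modify_key l Prod.fst ([] : List Int)
      (fun _ p => (· ++ [p.2])) PySem.Dict.empty (by simp [PySem.Dict.keys_empty])
  rw [PySem.Dict.items_eq_map_keys _ hnd ([] : List Int)]
  have hkeys : (l.foldl pvStep PySem.Dict.empty).keys = PySem.List.dedup (l.map (·.1)) := by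
    rw [hfold]
    rw [PySem.Dict.keys_foldl_modify_key l Prod.fst ([] : List Int)
      (fun _ p => (· ++ [p.2])) PySem.Dict.empty]
    simp [PySem.Dict.keys_empty, PySem.Set.update_nil_left]
  rw [hkeys]
  apply List.map_congr_left
  intro c _
  rw [hfold, PySem.Dict.getD_foldl_modify_append l PySem.Dict.empty c]
  rw [PySem.Dict.getD_empty]
  simp
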